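-- pv_equiv track=rewrite | github.com/dtpaltz/Python-Practice | Daily-Coding-Problems/WaysToClimbStairs.py | num_ways_X
-- ===== SOURCE A (Python) =====
-- def num_ways_X(n):
--     if n == 0:
--         return 1
--
--     total = 0
--     for i in [1, 3, 5]:
--         if n - 1 >= 0:
--             total += num_ways_X(n - i)
--     return total
-- ===== SOURCE B (Python) =====
-- def num_ways_X(n):
--     if n < 0:
--         return 0
--     a, b, c, d, e = 0, 0, 0, 0, 1  # window f(k-4..k), starting at k=0
--     for _ in range(n):
--         a, b, c, d, e = b, c, d, e, e + c + a
--     return e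
-- ===== Notes on version B (the rewrite author's own statement) =====
-- stated objective: faster
-- what changed: Replaced the exponential triple recursion with a bottom-up sliding-window DP keeping the last five values (f[i]=f[i-1]+f[i-3]+f[i-5]); Pre_ excludes only the large inputs on which A never returns (RecursionError beyond the interpreter recursion limit, non-terminating exponential recursion just below it).
import Mathlib
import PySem

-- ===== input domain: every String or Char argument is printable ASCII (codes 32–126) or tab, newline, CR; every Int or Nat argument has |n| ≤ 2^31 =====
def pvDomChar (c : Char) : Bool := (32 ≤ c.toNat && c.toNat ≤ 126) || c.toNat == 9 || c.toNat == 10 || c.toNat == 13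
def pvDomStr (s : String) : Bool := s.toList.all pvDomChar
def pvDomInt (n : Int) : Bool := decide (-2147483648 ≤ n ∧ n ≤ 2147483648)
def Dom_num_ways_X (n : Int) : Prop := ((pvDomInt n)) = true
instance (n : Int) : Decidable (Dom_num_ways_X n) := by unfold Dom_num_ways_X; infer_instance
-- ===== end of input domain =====

-- B replaces A's exponential triple recursion by a linear bottom-up sliding-window DP; intended as
-- faster (a timing run saw A time out at sizes where B returns at once).

-- ===== PORT A =====
-- Literal port of A: loop over [1,3,5] unrolled in order, same guard n-1 ≥ 0 each time.
def num_ways_X (n : Int) : Int :=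
  if n = 0 then 1
  else
    let t1 := if n - 1 ≥ 0 then 0 + num_ways_X (n - 1) else 0
    let t2 := if n - 1 ≥ 0 then t1 + num_ways_X (n - 3) else t1
    let t3 := if n - 1 ≥ 0 then t2 + num_ways_X (n - 5) else t2
    t3
termination_by n.toNat
decreasing_by all_goals omega

-- ===== PORT B =====
-- B: bottom-up sliding-window DP, window (a,b,c,d,e) = f(k-4..k).
def numWaysGo : Nat → Int × Int × Int × Int × Int → Int
  | 0, (_, _, _, _, e) => e
  | k + 1, (a, _b, c, d, e) => numWaysGo k (_b, c, d, e, e + c + a)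

def num_ways_X_alt (n : Int) : Int :=
  if n < 0 then 0
  else numWaysGo n.toNat (0, 0, 0, 0, 1)

-- ===== PRECONDITION & SPEC =====
-- Pre_ excludes only inputs on which A never returns a value: its n-1 recursion chain needs depth
-- ~n, so beyond the interpreter recursion limit A raises RecursionError, and in the band just below
-- the limit the uncached triple recursion never finishes; A returns on no excluded input.
def Pre_num_ways_X (n : Int) : Prop := n ≤ 950
instance (n : Int) : Decidable (Pre_num_ways_X n) := by unfold Pre_num_ways_X; infer_instance
def pvWitness_num_ways_X : Int := (7)

def Spec_num_ways_X (n : Int) (out : Int) : Prop := out = num_ways_X_alt n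
instance (n : Int) (out : Int) : Decidable (Spec_num_ways_X n out) := by unfold Spec_num_ways_X; infer_instance

-- ===== CLAIM =====
def Claim_equal_num_ways_X : Prop := ∀ (n : Int), Dom_num_ways_X n → Pre_num_ways_X n → Spec_num_ways_X n (num_ways_X n)

-- ===== LEMMAS AND PROOFS =====
theorem numA_neg (n : Int) (h : n < 0) : num_ways_X n = 0 := by
  unfold num_ways_X
  rw [if_neg (by omega)]
  simp only [if_neg (show ¬ (n - 1 ≥ 0) by omega)]

theorem numA_rec (n : Int) (h : 1 ≤ n) :
    num_ways_X n = num_ways_X (n-1) + num_ways_X (n-3) + num_ways_X (n-5) := by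
  conv_lhs => unfold num_ways_X
  rw [if_neg (by omega)]
  simp only [if_pos (show n - 1 ≥ 0 by omega)]
  ring

theorem go_inv (k : Nat) : ∀ (m : Int), 0 ≤ m →
    numWaysGo k (num_ways_X (m-4), num_ways_X (m-3), num_ways_X (m-2),
                 num_ways_X (m-1), num_ways_X m) = num_ways_X (m + k) := by
  induction k with
  | zero => intro m _; simp [numWaysGo]
  | succ k ih =>
    intro m hm
    have hrec := numA_rec (m+1) (by omega)
    have : num_ways_X m + num_ways_X (m-2) + num_ways_X (m-4) = num_ways_X (m+1) := by
      rw [hrec]; ring_nf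
    simp only [numWaysGo, this]
    have := ih (m+1) (by omega)
    simp only [show m+1-4 = m-3 by ring, show m+1-3 = m-2 by ring,
      show m+1-2 = m-1 by ring, show m+1-1 = m by ring] at this
    rw [this]
    congr 1
    push_cast
    ring

-- ===== VERDICT =====
theorem num_ways_X_spec : Claim_equal_num_ways_X := by
  intro n _ _
  unfold Spec_num_ways_X num_ways_X_alt
  by_cases h : n < 0
  · rw [if_pos h, numA_neg n h]
  · rw [if_neg h]
    have := go_inv n.toNat 0 le_rfl
    have e4 : num_ways_X (0-4) = 0 := numA_neg _ (by norm_num)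
    have e3 : num_ways_X (0-3) = 0 := numA_neg _ (by norm_num)
    have e2 : num_ways_X (0-2) = 0 := numA_neg _ (by norm_num)
    have e1 : num_ways_X (0-1) = 0 := numA_neg _ (by norm_num)
    have e0 : num_ways_X 0 = 1 := by unfold num_ways_X; simp
    rw [e4, e3, e2, e1, e0] at this
    rw [this]
    congr 1
    omega
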